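-- pv_equiv track=rewrite | github.com/XiaoCaoAskedForHelp/LeetCode-Py | 简单/Solution1652拆炸弹.py | decrypt1
-- ===== SOURCE A (Python) =====
-- from typing import List
--
-- def decrypt1(code: List[int], k: int) -> List[int]:
--     n = len(code)
--     ans = [0] * n
--     r = k + 1 if k > 0 else n  # 确定右端点
--     k = abs(k)
--     s = sum(code[r - k:r])
--     for i in range(n):
--         ans[i] = s
--         s += code[r % n] - code[(r - k) % n]  # 加上右端点，减去左端点
--         # r += 1
--         r = (r + 1) % n  # r这个对n求余加不加都可以，因为滑动窗口计算的时候有求余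
--     return ans
-- ===== SOURCE B (Python) =====
-- def decrypt1(code, k):
--     n = len(code)
--     if n == 0:
--         return []
--     prefix = [0]
--     run = 0
--     for v in code:
--         run += v
--         prefix.append(run)
--     total = prefix[n]
--     r = k + 1 if k > 0 else n
--     kk = abs(k)
--     base = sum(code[r - kk:r])
--     def seg(a, m):
--         # sum of code[(a + t) % n] for t in range(m), valid for 0 <= m < n
--         s = a % n
--         e = s + m
--         if e <= n:
--             return prefix[e] - prefix[s]
--         return total - prefix[s] + prefix[e - n]
--     return [base + seg(r, i) - seg(r - kk, i) for i in range(n)]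
-- ===== Notes on version B (the rewrite author's own statement) =====
-- stated objective: alternative
-- what changed: Replaces A's single-pass sliding window with a mutated running sum and circular endpoint updates by a prefix-sum table queried in O(1) per index: each output entry is computed independently as the initial slice sum plus the difference of two circular segment sums read off the table.
import Mathlib
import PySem

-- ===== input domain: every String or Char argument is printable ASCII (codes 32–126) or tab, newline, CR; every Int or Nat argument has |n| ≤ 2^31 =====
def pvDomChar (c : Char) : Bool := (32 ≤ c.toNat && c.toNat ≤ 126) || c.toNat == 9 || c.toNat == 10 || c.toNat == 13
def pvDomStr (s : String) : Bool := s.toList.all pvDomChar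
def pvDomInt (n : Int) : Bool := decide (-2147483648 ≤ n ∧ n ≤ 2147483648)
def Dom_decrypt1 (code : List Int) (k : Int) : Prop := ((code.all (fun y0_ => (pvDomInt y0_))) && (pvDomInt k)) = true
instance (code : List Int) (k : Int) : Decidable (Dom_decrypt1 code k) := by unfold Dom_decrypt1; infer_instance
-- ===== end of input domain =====

-- B replaces A's stateful sliding-window pass by a prefix-sum table with O(1) circular segment queries per index; return values are proved identical on every input.


-- ===== PORT A =====
-- literal port of A's sliding window; state is (ans, s, r). code[x % n] is read with
-- pyGetD at index (PySem.Int.mod x n), exact since 0 ≤ x % n < n whenever the loop body runs (n > 0).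
def decrypt1 (code : List Int) (k : Int) : List Int :=
  let n := code.length
  let ans := List.replicate n (0 : Int)
  let r : Int := if k > 0 then k + 1 else (n : Int)
  let k' : Int := |k|
  let s : Int := (PySem.List.slice code (some (r - k')) (some r)).sum
  let st := (PySem.List.pyRange 0 (n : Int) 1).foldl
    (fun (st : List Int × Int × Int) i =>
      let ans := st.1.set i.toNat st.2.1
      let s := st.2.1 + PySem.List.pyGetD code (PySem.Int.mod st.2.2 (n : Int)) 0
                      - PySem.List.pyGetD code (PySem.Int.mod (st.2.2 - k') (n : Int)) 0
      let r := PySem.Int.mod (st.2.2 + 1) (n : Int)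
      (ans, s, r))
    (ans, s, r)
  st.1

-- ===== PORT B =====
-- literal port of Source B: prefix-sum table, then each entry is base plus the difference of two
-- circular segment sums answered from the table. Indexing into `prefix` uses pyGetD, exact since
-- every index Source B uses lies in [0, n].
def decrypt1_alt (code : List Int) (k : Int) : List Int :=
  let n := code.length
  if n = 0 then []
  else
    let prefix_ := (code.foldl
      (fun (st : List Int × Int) v => (st.1 ++ [st.2 + v], st.2 + v)) ([0], 0)).1
    let total := PySem.List.pyGetD prefix_ (n : Int) 0
    let r : Int := if k > 0 then k + 1 else (n : Int)
    let kk : Int := |k|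
    let base : Int := (PySem.List.slice code (some (r - kk)) (some r)).sum
    let seg : Int → Int → Int := fun a m =>
      let s := PySem.Int.mod a (n : Int)
      let e := s + m
      if e ≤ (n : Int) then PySem.List.pyGetD prefix_ e 0 - PySem.List.pyGetD prefix_ s 0
      else total - PySem.List.pyGetD prefix_ s 0 + PySem.List.pyGetD prefix_ (e - (n : Int)) 0
    (PySem.List.pyRange 0 (n : Int) 1).map (fun i => base + seg r i - seg (r - kk) i)

-- ===== PRECONDITION & SPEC =====
-- (no Pre_: Python A returns normally on every input of the stated types)
def Spec_decrypt1 (code : List Int) (k : Int) (out : List Int) : Prop := out = decrypt1_alt code k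
instance (code : List Int) (k : Int) (out : List Int) : Decidable (Spec_decrypt1 code k out) := by unfold Spec_decrypt1; infer_instance

-- ===== CLAIM (what is proved, stated in full; the proofs are below) =====
def Claim_equal_decrypt1 : Prop := ∀ (code : List Int) (k : Int), Dom_decrypt1 code k → Spec_decrypt1 code k (decrypt1 code k)

-- ===== LEMMAS AND PROOFS =====

-- circular read: code[t % n]
def pvF (code : List Int) (t : Int) : Int :=
  PySem.List.pyGetD code (PySem.Int.mod t (code.length : Int)) 0

-- sum of m consecutive circular reads starting at a
def pvC (code : List Int) (a : Int) (m : Nat) : Int :=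
  ((List.range m).map (fun t : Nat => pvF code (a + (t : Int)))).sum

-- prefix sums: pvP code = [sum of the first x elements | x = 0..n]
def pvP (code : List Int) : List Int :=
  (List.range (code.length + 1)).map (fun x => (code.take x).sum)

theorem pvF_congr (code : List Int) (hn : 0 < code.length) {a b : Int}
    (h : a % (code.length : Int) = b % (code.length : Int)) : pvF code a = pvF code b := by
  unfold pvF
  rw [PySem.Int.mod_eq_emod_of_pos (by exact_mod_cast hn),
      PySem.Int.mod_eq_emod_of_pos (by exact_mod_cast hn), h]

theorem pvC_succ (code : List Int) (a : Int) (m : Nat) :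
    pvC code a (m + 1) = pvC code a m + pvF code (a + m) := by
  unfold pvC
  rw [List.range_succ]
  simp

theorem pvC_add (code : List Int) (a : Int) (u v : Nat) :
    pvC code a (u + v) = pvC code a u + pvC code (a + u) v := by
  unfold pvC
  rw [List.range_add]
  simp only [List.map_append, List.sum_append, List.map_map]
  congr 2
  apply List.map_congr_left
  intro t _
  simp only [Function.comp_apply]
  congr 1
  push_cast
  ring

theorem pvC_congr (code : List Int) (hn : 0 < code.length) {a b : Int}
    (h : a % (code.length : Int) = b % (code.length : Int)) (m : Nat) :
    pvC code a m = pvC code b m := by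
  unfold pvC
  congr 1
  apply List.map_congr_left
  intro t _
  apply pvF_congr code hn
  rw [Int.add_emod a, Int.add_emod b, h]

theorem set_map_range (g : Nat → Int) (n m : Nat) (hm : m < n) (v : Int) :
    ((List.range n).map g).set m v = (List.range n).map (fun t => if t = m then v else g t) := by
  apply List.ext_getElem
  · simp
  · intro i h1 h2
    simp only [List.getElem_set, List.getElem_map, List.getElem_range]
    rcases eq_or_ne i m with rfl | h
    · simp
    · simp [h, Ne.symm h]

theorem take_sum (ys : List Int) :
    ∀ Kn : Nat, Kn ≤ ys.length →
      (ys.take Kn).sum = ((List.range Kn).map (fun j : Nat => ys.getD j 0)).sum := by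
  intro Kn
  induction Kn with
  | zero => simp
  | succ K ih =>
    intro h
    rw [List.take_add_one, List.range_succ]
    have hK : K < ys.length := by omega
    simp only [List.map_append, List.map_cons, List.map_nil, List.sum_append, List.sum_cons,
      List.sum_nil, List.getElem?_eq_getElem hK, Option.toList_some]
    rw [ih (by omega)]
    simp [List.getD_eq_getElem?_getD, List.getElem?_eq_getElem hK]

-- the prefix-building fold computes pvP together with the total sum
theorem prefix_build (code : List Int) :
    code.foldl (fun (st : List Int × Int) v => (st.1 ++ [st.2 + v], st.2 + v)) ([0], 0)
      = (pvP code, code.sum) := by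
  induction code using List.reverseRecOn with
  | nil => simp [pvP]
  | append_singleton xs x ih =>
    rw [List.foldl_append, ih]
    simp only [List.foldl_cons, List.foldl_nil, List.sum_append, List.sum_cons, List.sum_nil,
      add_zero]
    refine Prod.ext ?_ rfl
    show pvP xs ++ [xs.sum + x] = pvP (xs ++ [x])
    unfold pvP
    rw [List.length_append, List.length_cons, List.length_nil]
    have hr : List.range (xs.length + 0 + 1 + 1) = List.range (xs.length + 1) ++ [xs.length + 1] := by
      rw [← List.range_succ]
    rw [hr, List.map_append]
    congr 1
    · apply List.map_congr_left
      intro y hy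
      have hy' : y ≤ xs.length := by
        have := List.mem_range.mp hy; omega
      rw [List.take_append_of_le_length hy']
    · simp only [List.map_cons, List.map_nil]
      congr 1
      rw [List.take_of_length_le (by simp), List.sum_append]
      simp
  
theorem pvP_get (code : List Int) (x : Nat) (hx : x ≤ code.length) :
    PySem.List.pyGetD (pvP code) ((x : Nat) : Int) 0 = (code.take x).sum := by
  rw [PySem.List.pyGetD_natCast]
  unfold pvP
  rw [List.getD_eq_getElem?_getD, List.getElem?_map, List.getElem?_range (by omega)]
  simp

-- a circular segment that stays inside the list is a difference of prefix sums
theorem pvC_prefix (code : List Int) (s i : Nat) (h : s + i ≤ code.length) :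
    pvC code (s : Int) i = (code.take (s + i)).sum - (code.take s).sum := by
  rw [take_sum code (s + i) h, take_sum code s (by omega), List.range_add, List.map_append,
    List.sum_append, List.map_map]
  have hc : ((List.range i).map ((fun j : Nat => code.getD j 0) ∘ (fun x => s + x))).sum
      = pvC code (s : Int) i := by
    unfold pvC
    apply congrArg
    apply List.map_congr_left
    intro t ht
    have htl : s + t < code.length := by
      have := List.mem_range.mp ht; omega
    simp only [Function.comp_apply]
    unfold pvF
    rw [PySem.Int.mod_eq_emod_of_pos (by exact_mod_cast (by omega : 0 < code.length)),
      Int.emod_eq_of_lt (by omega) (by omega),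
      PySem.List.pyGetD_eq_getElem code 0 (by omega) (by omega)]
    rw [List.getD_eq_getElem?_getD, List.getElem?_eq_getElem htl]
    have harg : ((s : Int) + (t : Int)).toNat = s + t := by omega
    simp [harg]
  rw [hc]
  ring

-- Source B's `seg` (as it appears in the port, with the prefix table pvP) computes pvC
theorem seg_eq (code : List Int) (hn : 0 < code.length) (a : Int) (t : Nat)
    (ht : t < code.length) :
    (if PySem.Int.mod a (code.length : Int) + (t : Int) ≤ (code.length : Int)
     then PySem.List.pyGetD (pvP code) (PySem.Int.mod a (code.length : Int) + (t : Int)) 0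
          - PySem.List.pyGetD (pvP code) (PySem.Int.mod a (code.length : Int)) 0
     else PySem.List.pyGetD (pvP code) ((code.length : Nat) : Int) 0
          - PySem.List.pyGetD (pvP code) (PySem.Int.mod a (code.length : Int)) 0
          + PySem.List.pyGetD (pvP code) (PySem.Int.mod a (code.length : Int) + (t : Int)
              - (code.length : Int)) 0)
    = pvC code a t := by
  have hnz : (0 : Int) < (code.length : Int) := by exact_mod_cast hn
  have hmod := PySem.Int.mod_eq_emod_of_pos (a := a) hnz
  have h0 : 0 ≤ a % (code.length : Int) := Int.emod_nonneg a (by omega)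
  have h1 : a % (code.length : Int) < (code.length : Int) := Int.emod_lt_of_pos a hnz
  set sN : Nat := (a % (code.length : Int)).toNat with hsN
  have hsc : ((sN : Nat) : Int) = a % (code.length : Int) := by omega
  have hsn : sN < code.length := by omega
  have hCa : pvC code a t = pvC code (sN : Int) t := by
    apply pvC_congr code hn
    rw [hsc, Int.emod_emod_of_dvd _ dvd_rfl]
  rw [hmod, ← hsc]
  by_cases hcase : ((sN : Nat) : Int) + (t : Int) ≤ (code.length : Int)
  · rw [if_pos hcase]
    have he : ((sN : Nat) : Int) + (t : Int) = (((sN + t : Nat)) : Int) := by push_cast; ring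
    rw [he, pvP_get code (sN + t) (by omega), pvP_get code sN (by omega), hCa,
      pvC_prefix code sN t (by omega)]
  · rw [if_neg hcase]
    have hu : sN + (code.length - sN) = code.length := by omega
    have hv : t = (code.length - sN) + (sN + t - code.length) := by omega
    rw [hCa, hv, pvC_add]
    have hA : pvC code (sN : Int) (code.length - sN)
        = (code.take code.length).sum - (code.take sN).sum := by
      have := pvC_prefix code sN (code.length - sN) (by omega)
      rw [hu] at this
      exact this
    have hB : pvC code ((sN : Int) + ((code.length - sN : Nat) : Int)) (sN + t - code.length)
        = pvC code ((0 : Nat) : Int) (sN + t - code.length) := by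
      apply pvC_congr code hn
      rw [show ((sN : Nat) : Int) + ((code.length - sN : Nat) : Int)
            = 0 + (code.length : Int) * 1 from by omega]
      rw [Int.add_mul_emod_self_left]
      simp
    have hC : pvC code ((0 : Nat) : Int) (sN + t - code.length)
        = (code.take (sN + t - code.length)).sum := by
      have := pvC_prefix code 0 (sN + t - code.length) (by omega)
      simpa using this
    rw [hA, hB, hC, pvP_get code code.length le_rfl, pvP_get code sN (by omega)]
    have he2 : ((sN : Nat) : Int) + ((code.length - sN + (sN + t - code.length) : Nat) : Int)
        - (code.length : Int) = (((sN + t - code.length : Nat)) : Int) := by omega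
    rw [he2]
    rw [pvP_get code (sN + t - code.length) (by omega)]

-- invariant of A's sliding-window fold: after m steps the running sum is the initial sum plus the
-- telescoped difference of the two circular segments of length m
theorem fold_inv (code : List Int) (hn : 0 < code.length) (K : Nat) (r0 s0 : Int) :
    ∀ m : Nat, m ≤ code.length →
      ∃ R : Int, R % (code.length : Int) = (r0 + m) % (code.length : Int) ∧
        (List.range m).foldl
          (fun (st : List Int × Int × Int) (i : Nat) =>
            (st.1.set i st.2.1,
             st.2.1 + PySem.List.pyGetD code (PySem.Int.mod st.2.2 (code.length : Int)) 0
                    - PySem.List.pyGetD code (PySem.Int.mod (st.2.2 - (K : Int)) (code.length : Int)) 0,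
             PySem.Int.mod (st.2.2 + 1) (code.length : Int)))
          ((List.range code.length).map (fun _ => (0 : Int)), s0, r0)
        = ((List.range code.length).map
             (fun t => if t < m then s0 + pvC code r0 t - pvC code (r0 - K) t else 0),
           s0 + pvC code r0 m - pvC code (r0 - K) m, R) := by
  intro m
  induction m with
  | zero =>
    intro _
    refine ⟨r0, by simp, ?_⟩
    simp [pvC]
  | succ m ih =>
    intro hm
    obtain ⟨R, hR, hfold⟩ := ih (by omega)
    have hnz : (0 : Int) < (code.length : Int) := by exact_mod_cast hn
    rw [List.range_succ, List.foldl_append, hfold]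
    simp only [List.foldl_cons, List.foldl_nil]
    refine ⟨PySem.Int.mod (R + 1) (code.length : Int), ?_, ?_⟩
    · rw [PySem.Int.mod_eq_emod_of_pos hnz, Int.emod_emod_of_dvd _ dvd_rfl]
      have h3 : (R + 1) % (code.length : Int) = ((r0 + m) + 1) % (code.length : Int) := by
        rw [Int.add_emod R 1, hR, ← Int.add_emod]
      rw [h3]
      congr 1
      push_cast; ring
    · have hset : ((List.range code.length).map
            (fun t => if t < m then s0 + pvC code r0 t - pvC code (r0 - K) t else 0)).set
          m (s0 + pvC code r0 m - pvC code (r0 - K) m)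
          = (List.range code.length).map
            (fun t => if t < m + 1 then s0 + pvC code r0 t - pvC code (r0 - K) t else 0) := by
        rw [set_map_range _ _ _ (by omega)]
        apply List.map_congr_left
        intro t _
        by_cases h1 : t = m
        · simp [h1]
        · have he : (t < m + 1) = (t < m) := by
            apply propext; constructor <;> intro <;> omega
          simp [h1, he]
      have hr1 : PySem.List.pyGetD code (PySem.Int.mod R (code.length : Int)) 0
          = pvF code (r0 + m) := by
        have h4 : pvF code R = pvF code (r0 + m) := by
          exact pvF_congr code hn hR
        exact h4
      have hr2 : PySem.List.pyGetD code (PySem.Int.mod (R - K) (code.length : Int)) 0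
          = pvF code ((r0 - K) + m) := by
        have h5 : pvF code (R - K) = pvF code ((r0 - K) + m) := by
          apply pvF_congr code hn
          rw [Int.sub_emod R, hR, ← Int.sub_emod]
          congr 1; ring
        exact h5
      rw [hset, hr1, hr2, pvC_succ, pvC_succ]
      refine Prod.ext rfl (Prod.ext ?_ rfl)
      show _ = s0 + (pvC code r0 m + pvF code (r0 + m)) - (pvC code (r0 - K) m + pvF code (r0 - K + m))
      ring

-- A's result: entry t is the initial slice sum plus the telescoped circular-segment difference
theorem decrypt1_eq (code : List Int) (k : Int) (hn : 0 < code.length) :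
    decrypt1 code k = (List.range code.length).map
      (fun t => (PySem.List.slice code
          (some ((if k > 0 then k + 1 else (code.length : Int)) - (k.natAbs : Int)))
          (some (if k > 0 then k + 1 else (code.length : Int)))).sum
        + pvC code (if k > 0 then k + 1 else (code.length : Int)) t
        - pvC code ((if k > 0 then k + 1 else (code.length : Int)) - (k.natAbs : Int)) t) := by
  unfold decrypt1
  dsimp only
  rw [← Int.natCast_natAbs k]
  set r0 : Int := if k > 0 then k + 1 else (code.length : Int) with hr0
  have hrepl : List.replicate code.length (0 : Int)
      = (List.range code.length).map (fun _ => (0 : Int)) := by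
    rw [List.map_const', List.length_range]
  rw [hrepl]
  simp only [PySem.List.pyRange_zero_natCast, List.foldl_map, Int.toNat_natCast]
  obtain ⟨R, _, hfold⟩ := fold_inv code hn k.natAbs r0
    ((PySem.List.slice code (some (r0 - (k.natAbs : Int))) (some r0)).sum) code.length le_rfl
  rw [hfold]
  apply List.map_congr_left
  intro t ht
  simp [List.mem_range.mp ht]

theorem main_eq (code : List Int) (k : Int) : decrypt1 code k = decrypt1_alt code k := by
  rcases List.eq_nil_or_concat' code with rfl | h
  · -- empty list: both sides are []
    have h0 : PySem.List.pyRange 0 (((0 : Nat) : Int)) 1 = [] := by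
      simpa using PySem.List.pyRange_zero_natCast 0
    simp only [Nat.cast_zero] at h0
    simp [decrypt1, decrypt1_alt, h0]
  · have hn : 0 < code.length := by
      obtain ⟨ys, y, rfl⟩ := h
      simp
    rw [decrypt1_eq code k hn]
    unfold decrypt1_alt
    dsimp only
    rw [if_neg (show ¬ code.length = 0 by omega)]
    have hpb : (code.foldl (fun (st : List Int × Int) v => (st.1 ++ [st.2 + v], st.2 + v))
        ([0], 0)).1 = pvP code := by
      rw [prefix_build]
    rw [hpb, ← Int.natCast_natAbs k]
    simp only [PySem.List.pyRange_zero_natCast, List.map_map]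
    apply List.map_congr_left
    intro t ht
    have ht' : t < code.length := List.mem_range.mp ht
    simp only [Function.comp_apply]
    rw [seg_eq code hn _ t ht', seg_eq code hn _ t ht']

-- ===== VERDICT (by name: the statement is the Claim_ definition above) =====
theorem decrypt1_spec : Claim_equal_decrypt1 := by
  intro code k _
  exact main_eq code k
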